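-- pv_equiv track=rewrite | github.com/KCaglarCoskun/multi-level-mvm-verification | multilevelmvmverification/methods.py | get_next_nondescending_vector
-- ===== SOURCE A (Python) =====
-- def get_next_nondescending_vector(current_vector, N: int, max_value: int):
--     """
--     Assuming a list of vectors where these elements of the vector are
--     non-descending, this function returns the next vector in the list.
--
--     Every element gets values from `0` to `max_value`.
--
--     Returns the next vector and the index for bookkeeping.
--     """
--     # Increment the coordinates
--     if current_vector[N - 1] <= max_value - 1:
--         current_vector[N - 1] += 1
--     else:  # current_vector[N - 1] == max_value
--         # Carrying over
--         # The carry is added to the position between non-max and max values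
--         # For example, for a vector _____adddddd, where the max values is 'd',
--         # the vector is incremented to _____bbbbbbb.
--         idx_to_add_carry = N - 1 - 1
--         while (idx_to_add_carry >= 0
--                 and current_vector[idx_to_add_carry] == max_value):
--             idx_to_add_carry -= 1
--         if idx_to_add_carry == -1:
--             return None
--         next_value = current_vector[idx_to_add_carry] + 1
--         for i in range(idx_to_add_carry, N):
--             current_vector[i] = next_value
--
--     return current_vector
-- ===== SOURCE B (Python) =====
-- def get_next_nondescending_vector(current_vector, N: int, max_value: int):
--     """Recursive (functional) variant: builds a fresh list instead of mutating.
--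
--     `bump(n)` returns the successor of the n-element prefix under the carry
--     rule, or None when it has no successor; the carried fill value propagates
--     by appending the recursive result's last element, so there is no pivot
--     index, no next_value variable and no fill loop.
--     """
--     def bump(n):
--         if n <= 0:
--             return None
--         v = current_vector[n - 1]
--         if v != max_value:
--             return current_vector[:n - 1] + [v + 1]
--         res = bump(n - 1)
--         return None if res is None else res + [res[-1]]
--
--     last = current_vector[N - 1]
--     if last < max_value:
--         head = current_vector[:N - 1] + [last + 1]
--     else:
--         head = bump(N - 1)
--         if head is None:
--             return None
--         head = head + [head[-1]]
--     return head + current_vector[N:]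
-- ===== Notes on version B (the rewrite author's own statement) =====
-- stated objective: alternative
-- what changed: A scans backward for a pivot index, then runs a separate fill loop mutating the list in place; B is recursive and purely functional: bump(n) returns the successor of the n-element prefix built by list concatenation, the carried fill value propagating by appending the recursive result's last element, with no pivot index, no next_value variable and no fill loop (return-value equivalence: A mutates its argument, B does not).
-- outside the precondition, e.g. on get_next_nondescending_vector([0, 1], 0, 5): A returns [0, 2], B returns [0, 2, 0, 1]; on get_next_nondescending_vector([3, 3], 0, 3): A returns [4, 4], B returns None; on get_next_nondescending_vector([0], 2, 5): A raises IndexError, B raises IndexError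
import Mathlib
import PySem

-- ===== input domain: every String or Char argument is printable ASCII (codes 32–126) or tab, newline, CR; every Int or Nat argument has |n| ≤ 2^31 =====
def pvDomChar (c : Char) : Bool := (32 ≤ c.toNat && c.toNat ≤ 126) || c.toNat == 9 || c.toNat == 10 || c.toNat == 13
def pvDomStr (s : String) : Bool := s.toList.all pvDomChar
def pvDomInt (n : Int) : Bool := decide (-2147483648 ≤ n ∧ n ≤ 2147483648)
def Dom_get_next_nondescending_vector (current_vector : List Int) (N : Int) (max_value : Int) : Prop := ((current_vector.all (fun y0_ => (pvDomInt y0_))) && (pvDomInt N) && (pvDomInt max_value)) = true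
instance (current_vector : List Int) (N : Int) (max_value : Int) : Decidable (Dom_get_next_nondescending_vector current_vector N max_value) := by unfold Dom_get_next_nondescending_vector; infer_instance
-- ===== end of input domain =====

-- B replaces A's backward pivot scan plus in-place fill loop by a recursive, purely
-- functional successor builder (objective: alternative); A mutates its argument in
-- Python while B builds a fresh list, so the equivalence is about the RETURN value.


-- ===== PORT A =====
-- A's carry while-loop: decrement idx while idx >= 0 and cv[idx] == max_value.
-- Fuel bounds the iteration count; the default max_value+1 on pyGetD only fires
-- outside Pre_ (where Python would raise IndexError).
def pvA_carry (cv : List Int) (max_value : Int) : Nat → Int → Int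
  | 0, idx => idx
  | fuel+1, idx =>
    if 0 ≤ idx ∧ PySem.List.pyGetD cv idx (max_value + 1) = max_value then
      pvA_carry cv max_value fuel (idx - 1)
    else idx

def get_next_nondescending_vector (current_vector : List Int) (N : Int) (max_value : Int) : Option (List Int) :=
  match PySem.List.pyGet? current_vector (N - 1) with
  | none => none  -- IndexError: excluded by Pre_
  | some last =>
    if last ≤ max_value - 1 then
      some (PySem.List.pySetD current_vector (N - 1) (last + 1))
    else
      let idx := pvA_carry current_vector max_value (N - 1).toNat (N - 1 - 1)
      if idx = -1 then none
      else
        let next_value := PySem.List.pyGetD current_vector idx 0 + 1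
        some ((PySem.List.pyRange idx N 1).foldl
          (fun acc i => PySem.List.pySetD acc i next_value) current_vector)

-- ===== PORT B =====
-- Source B's recursive helper bump(n): successor of the n-element prefix, or none;
-- the Nat argument realises the `n <= 0` guard, cv[:n-1] is slice, res[-1] is pyGetD at -1.
def pvB_bump (cv : List Int) (mv : Int) : Nat → Option (List Int)
  | 0 => none
  | n+1 =>
    let v := PySem.List.pyGetD cv (n : Int) 0
    if v ≠ mv then some (PySem.List.slice cv none (some (n : Int)) ++ [v + 1])
    else
      match pvB_bump cv mv n with
      | none => none
      | some res => some (res ++ [PySem.List.pyGetD res (-1) 0])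

def get_next_nondescending_vector_alt (current_vector : List Int) (N : Int) (max_value : Int) : Option (List Int) :=
  match PySem.List.pyGet? current_vector (N - 1) with
  | none => none  -- IndexError: excluded by Pre_
  | some last =>
    if last < max_value then
      some ((PySem.List.slice current_vector none (some (N - 1)) ++ [last + 1])
            ++ PySem.List.slice current_vector (some N) none)
    else
      match pvB_bump current_vector max_value (N - 1).toNat with
      | none => none
      | some head => some ((head ++ [PySem.List.pyGetD head (-1) 0])
            ++ PySem.List.slice current_vector (some N) none)

-- ===== PRECONDITION & SPEC =====
-- Pre_ restricts N to the function's natural domain 1..len(current_vector) (N counts the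
-- vector positions being enumerated): for N > len(current_vector) A raises IndexError, and
-- for N <= 0 A reads and writes through Python's negative-index wraparound (an accident of
-- indexing; B returns a different value or None there), so nothing is claimed outside 1..len.
def Pre_get_next_nondescending_vector (current_vector : List Int) (N : Int) (max_value : Int) : Prop :=
  1 ≤ N ∧ N ≤ (current_vector.length : Int)
instance (current_vector : List Int) (N : Int) (max_value : Int) : Decidable (Pre_get_next_nondescending_vector current_vector N max_value) := by unfold Pre_get_next_nondescending_vector; infer_instance

def pvWitness_get_next_nondescending_vector : List Int × Int × Int := ([0, 2, 2], 3, 2)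

def Spec_get_next_nondescending_vector (current_vector : List Int) (N : Int) (max_value : Int) (out : Option (List Int)) : Prop := out = get_next_nondescending_vector_alt current_vector N max_value
instance (current_vector : List Int) (N : Int) (max_value : Int) (out : Option (List Int)) : Decidable (Spec_get_next_nondescending_vector current_vector N max_value out) := by unfold Spec_get_next_nondescending_vector; infer_instance

-- ===== CLAIM (what is proved, stated in full; the proofs are below) =====
def Claim_equal_get_next_nondescending_vector : Prop := ∀ (current_vector : List Int) (N : Int) (max_value : Int), Dom_get_next_nondescending_vector current_vector N max_value → Pre_get_next_nondescending_vector current_vector N max_value → Spec_get_next_nondescending_vector current_vector N max_value (get_next_nondescending_vector current_vector N max_value)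

-- ===== LEMMAS AND PROOFS =====

-- A's fill loop `for i in range(a, n): cv[i] = w` as take/replicate/drop.
lemma pv_fill_eq (w : Int) (n : Nat) : ∀ (k a : Nat) (cv : List Int), a + k = n → n ≤ cv.length →
    (PySem.List.pyRange (a : Int) (n : Int) 1).foldl (fun acc i => PySem.List.pySetD acc i w) cv
      = cv.take a ++ List.replicate k w ++ cv.drop n := by
  intro k
  induction k with
  | zero =>
    intro a cv hk hlen
    subst hk
    rw [PySem.List.pyRange_one_eq_nil (by simp)]
    simp
  | succ k ih =>
    intro a cv hk hlen
    rw [PySem.List.pyRange_one_cons (by exact_mod_cast (by omega : a < n))]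
    simp only [List.foldl_cons]
    rw [PySem.List.pySetD_of_nonneg cv w (by positivity)]
    have ha : (a : Int) + 1 = ((a + 1 : Nat) : Int) := by push_cast; ring
    rw [ha, Int.toNat_natCast,
        ih (a + 1) (cv.set a w) (by omega) (by simpa using hlen)]
    rw [List.take_set, List.drop_set]
    rw [if_pos (by omega)]
    have hstep : (cv.take (a + 1)).set a w = cv.take a ++ [w] := by
      rw [List.set_eq_take_cons_drop w (by simp; omega)]
      simp [List.take_take]
    rw [hstep]
    simp [List.replicate_succ]

-- the carry loop never leaves [-1, start]
lemma pv_carry_ge (cv : List Int) (mv : Int) :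
    ∀ (f : Nat) (i : Int), -1 ≤ i → -1 ≤ pvA_carry cv mv f i := by
  intro f
  induction f with
  | zero => intro i hi; simpa [pvA_carry] using hi
  | succ f ih =>
    intro i hi
    simp only [pvA_carry]
    split
    · exact ih (i - 1) (by omega)
    · exact hi

lemma pv_carry_le (cv : List Int) (mv b : Int) :
    ∀ (f : Nat) (i : Int), i ≤ b → pvA_carry cv mv f i ≤ b := by
  intro f
  induction f with
  | zero => intro i hi; simpa [pvA_carry] using hi
  | succ f ih =>
    intro i hi
    simp only [pvA_carry]
    split
    · exact ih (i - 1) (by omega)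
    · exact hi

-- B's recursive bump(n) equals "pivot := A's carry from n-1; take ++ replicate", prefix-only.
lemma pv_bump_eq (cv : List Int) (mv : Int) : ∀ (n : Nat), (n : Int) ≤ cv.length →
    pvB_bump cv mv n =
      (if pvA_carry cv mv n ((n : Int) - 1) = -1 then none
       else some (cv.take (pvA_carry cv mv n ((n : Int) - 1)).toNat
                  ++ List.replicate (n - (pvA_carry cv mv n ((n : Int) - 1)).toNat)
                       (PySem.List.pyGetD cv (pvA_carry cv mv n ((n : Int) - 1)) 0 + 1))) := by
  intro n
  induction n with
  | zero =>
    intro _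
    simp [pvB_bump, pvA_carry]
  | succ n ih =>
    intro hlen
    have hn1 : ((n + 1 : Nat) : Int) - 1 = (n : Int) := by push_cast; ring
    have hget : PySem.List.pyGetD cv (n : Int) (mv + 1) = PySem.List.pyGetD cv (n : Int) 0 := by
      rw [PySem.List.pyGetD_of_nonneg cv _ (by positivity),
          PySem.List.pyGetD_of_nonneg cv _ (by positivity)]
      have hl : (n : Int).toNat < cv.length := by omega
      rw [List.getD_eq_getElem _ _ hl, List.getD_eq_getElem _ _ hl]
    rw [hn1]
    by_cases hv : PySem.List.pyGetD cv (n : Int) 0 = mv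
    · have hA : pvA_carry cv mv (n + 1) (n : Int) = pvA_carry cv mv n ((n : Int) - 1) := by
        simp only [pvA_carry]
        rw [if_pos ⟨by positivity, by rw [hget]; exact hv⟩]
      have hB : pvB_bump cv mv (n + 1) =
          match pvB_bump cv mv n with
          | none => none
          | some res => some (res ++ [PySem.List.pyGetD res (-1) 0]) := by
        simp only [pvB_bump]
        rw [if_neg (not_not_intro hv)]
      rw [hA, hB, ih (by omega)]
      by_cases hj : pvA_carry cv mv n ((n : Int) - 1) = -1
      · rw [if_pos hj, if_pos hj]
      · rw [if_neg hj, if_neg hj]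
        have hjge : -1 ≤ pvA_carry cv mv n ((n : Int) - 1) :=
          pv_carry_ge cv mv n ((n : Int) - 1) (by omega)
        have hjle : pvA_carry cv mv n ((n : Int) - 1) ≤ (n : Int) - 1 :=
          pv_carry_le cv mv ((n : Int) - 1) n ((n : Int) - 1) le_rfl
        set j := pvA_carry cv mv n ((n : Int) - 1) with hjdef
        set w := PySem.List.pyGetD cv j 0 + 1 with hwdef
        have hk : 1 ≤ n - j.toNat := by omega
        have hrep : List.replicate (n - j.toNat) w
            = List.replicate (n - j.toNat - 1) w ++ [w] := by
          rw [← List.replicate_succ']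
          congr 1
          omega
        have hlast : PySem.List.pyGetD (cv.take j.toNat ++ List.replicate (n - j.toNat) w) (-1) 0 = w := by
          rw [hrep, ← List.append_assoc, PySem.List.pyGetD_neg_one_append_singleton]
        simp only [Option.some.injEq]
        rw [hlast, List.append_assoc, ← List.replicate_succ',
            show (n + 1) - j.toNat = (n - j.toNat) + 1 from by omega]
    · have hA : pvA_carry cv mv (n + 1) (n : Int) = (n : Int) := by
        simp only [pvA_carry]
        rw [if_neg (by rw [hget]; tauto)]
      have hB : pvB_bump cv mv (n + 1) =
          some (PySem.List.slice cv none (some (n : Int)) ++ [PySem.List.pyGetD cv (n : Int) 0 + 1]) := by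
        simp only [pvB_bump]
        rw [if_pos hv]
      rw [hA, hB, if_neg (by omega), PySem.List.slice_to cv (by positivity)]
      simp

-- ===== VERDICT (by name: the statement is the Claim_ definition above) =====
theorem get_next_nondescending_vector_spec : Claim_equal_get_next_nondescending_vector := by
  intro cv N mv _ hpre
  obtain ⟨hN1, hN2⟩ := hpre
  unfold Spec_get_next_nondescending_vector
  have hlt : (N - 1).toNat < cv.length := by omega
  have hget : PySem.List.pyGet? cv (N - 1) = some cv[(N - 1).toNat] := by
    simp only [PySem.List.pyGet?, PySem.List.pyIdx?]
    rw [if_pos (by omega), if_pos (by omega)]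
    simp
  unfold get_next_nondescending_vector get_next_nondescending_vector_alt
  rw [hget]
  dsimp only
  by_cases hfast : cv[(N - 1).toNat] ≤ mv - 1
  · rw [if_pos hfast, if_pos (by omega : cv[(N - 1).toNat] < mv)]
    rw [PySem.List.pySetD_of_nonneg cv _ (by omega),
        PySem.List.slice_to cv (by omega), PySem.List.slice_from cv (by omega : (0:Int) ≤ N)]
    rw [List.set_eq_take_cons_drop _ hlt]
    have h2 : N.toNat = (N - 1).toNat + 1 := by omega
    rw [h2]
    simp
  · rw [if_neg hfast, if_neg (by omega : ¬ cv[(N - 1).toNat] < mv)]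
    have hcast : ((N - 1).toNat : Int) = N - 1 := by omega
    have hcarry : pvA_carry cv mv (N - 1).toNat (((N - 1).toNat : Int) - 1)
        = pvA_carry cv mv (N - 1).toNat (N - 1 - 1) := by rw [hcast]
    rw [pv_bump_eq cv mv (N - 1).toNat (by omega), hcarry]
    by_cases hjn : pvA_carry cv mv (N - 1).toNat (N - 1 - 1) = -1
    · rw [if_pos hjn, if_pos hjn]
    · rw [if_neg hjn, if_neg hjn]
      have hjge : -1 ≤ pvA_carry cv mv (N - 1).toNat (N - 1 - 1) :=
        pv_carry_ge cv mv (N - 1).toNat (N - 1 - 1) (by omega)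
      have hjle : pvA_carry cv mv (N - 1).toNat (N - 1 - 1) ≤ N - 2 :=
        pv_carry_le cv mv (N - 2) (N - 1).toNat (N - 1 - 1) (by omega)
      set j := pvA_carry cv mv (N - 1).toNat (N - 1 - 1) with hjdef
      set w := PySem.List.pyGetD cv j 0 + 1 with hwdef
      have hcj : ((j.toNat : Nat) : Int) = j := by omega
      have hcn : ((N.toNat : Nat) : Int) = N := by omega
      rw [show PySem.List.pyRange j N 1
            = PySem.List.pyRange ((j.toNat : Nat) : Int) ((N.toNat : Nat) : Int) 1 by rw [hcj, hcn]]
      rw [pv_fill_eq _ N.toNat (N.toNat - j.toNat) j.toNat cv (by omega) (by omega)]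
      have hk : 1 ≤ (N - 1).toNat - j.toNat := by omega
      have hrep : List.replicate ((N - 1).toNat - j.toNat) w
          = List.replicate ((N - 1).toNat - j.toNat - 1) w ++ [w] := by
        rw [← List.replicate_succ']
        congr 1
        omega
      have hlast : PySem.List.pyGetD (cv.take j.toNat ++ List.replicate ((N - 1).toNat - j.toNat) w) (-1) 0 = w := by
        rw [hrep, ← List.append_assoc, PySem.List.pyGetD_neg_one_append_singleton]
      dsimp only
      rw [hlast, PySem.List.slice_from cv (by omega : (0:Int) ≤ N),
          show N.toNat - j.toNat = ((N - 1).toNat - j.toNat) + 1 from by omega,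
          List.replicate_succ']
      simp
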